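-- pv_equiv track=rewrite | github.com/ansara/persephone | persephone/pipeline/nlp/nlp.py | sanitize_words
-- ===== SOURCE A (Python) =====
-- SLANG_DICT = {
--     "4": "a",
--     "8": "b",
--     "3": "e",
--     "6": "g",
--     "1": "i",
--     "0": "o",
--     "7": "t",
--     "2": "z",
--     "!": "l",
--     "$": "s",
--     "@": "a",
--     "*": "",
--     "(": "",
--     ")": "",
-- }
--
-- def sanitize_words(text_list):
--
--     # translate slang
--     for word in text_list:
--         temp_word = word
--         if temp_word[-1] == "1":
--             temp_word = temp_word[:-1] + "one"
--
--         for slang_character in SLANG_DICT: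
--             temp_word = temp_word.replace(slang_character, SLANG_DICT[slang_character])
--
--         text_list[text_list.index(word)] = temp_word
--
--     text_list = " ".join(text_list)
--     return text_list
-- ===== SOURCE B (Python) =====
-- SLANG_DICT = {
--     "4": "a",
--     "8": "b",
--     "3": "e",
--     "6": "g",
--     "1": "i",
--     "0": "o",
--     "7": "t",
--     "2": "z",
--     "!": "l",
--     "$": "s",
--     "@": "a",
--     "*": "",
--     "(": "",
--     ")": "",
-- }
--
-- def sanitize_words(text_list):
--     # one translation table built once; single pass per word instead of 14 .replace scans
--     table = str.maketrans(SLANG_DICT)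
--     for i in range(len(text_list)):
--         temp = text_list[i]
--         if temp[-1] == "1":
--             temp = temp[:-1] + "one"
--         text_list[i] = temp.translate(table)
--     return " ".join(text_list)
-- ===== Notes on version B (the rewrite author's own statement) =====
-- stated objective: faster
-- what changed: Replaces A's inner loop of 14 sequential full-string str.replace scans plus a text_list.index search per word with a single character-translation table built once (str.maketrans) applied in one pass per word, writing back by index.
import Mathlib
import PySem

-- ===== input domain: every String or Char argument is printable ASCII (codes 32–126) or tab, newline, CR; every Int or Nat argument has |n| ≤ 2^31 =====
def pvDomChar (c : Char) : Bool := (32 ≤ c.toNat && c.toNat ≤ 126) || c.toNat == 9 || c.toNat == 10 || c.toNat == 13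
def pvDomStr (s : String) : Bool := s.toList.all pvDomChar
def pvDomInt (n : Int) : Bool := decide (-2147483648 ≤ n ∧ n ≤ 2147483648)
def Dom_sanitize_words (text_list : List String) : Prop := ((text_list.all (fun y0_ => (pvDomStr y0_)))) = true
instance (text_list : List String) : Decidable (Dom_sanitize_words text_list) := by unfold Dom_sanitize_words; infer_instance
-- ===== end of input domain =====

-- B builds one char-translation table applied in a single pass per word, instead of A's
-- 14 sequential .replace scans and list.index search per word; return-value equivalence is
-- proved (both Pythons also mutate text_list in place, identically).

-- ===== PORT A =====
-- SLANG_DICT, in insertion order, on code points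
def pySLANG_DICT : List (List Char × List Char) :=
  [(['4'], ['a']), (['8'], ['b']), (['3'], ['e']), (['6'], ['g']), (['1'], ['i']),
   (['0'], ['o']), (['7'], ['t']), (['2'], ['z']), (['!'], ['l']), (['$'], ['s']),
   (['@'], ['a']), (['*'], []), (['('], []), ([')'], [])]

-- one iteration of A's inner sanitation of a word: the '1'-suffix guard, then the 14 replaces
def sanWordA (word : String) : String :=
  let cs := word.toList
  let cs :=
    if PySem.List.pyGet? cs (-1) = some '1' then
      PySem.List.slice cs none (some (-1)) ++ "one".toList
    else cs
  String.ofList (pySLANG_DICT.foldl (fun t p => PySem.Chars.replace t p.1 p.2) cs)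

-- A's for-loop: runs over indices of the list it mutates via text_list.index(word)
-- (index? is always `some` here since word = l[i] ∈ l; Python's ValueError is unreachable)
def sanLoopA (l : List String) (i : Nat) : List String :=
  if h : i < l.length then
    let word := l[i]
    let temp := sanWordA word
    let l' := l.set ((PySem.List.index? l word).getD 0) temp
    sanLoopA l' (i + 1)
  else l
termination_by l.length - i
decreasing_by simp only [List.length_set]; omega

def sanitize_words (text_list : List String) : String :=
  PySem.Str.join " " (sanLoopA text_list 0)

-- ===== PORT B =====
-- the translation table char → replacement (str.maketrans(SLANG_DICT)); identity off the table
def transChar (c : Char) : List Char :=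
  if c = '4' then ['a'] else if c = '8' then ['b'] else if c = '3' then ['e']
  else if c = '6' then ['g'] else if c = '1' then ['i'] else if c = '0' then ['o']
  else if c = '7' then ['t'] else if c = '2' then ['z'] else if c = '!' then ['l']
  else if c = '$' then ['s'] else if c = '@' then ['a'] else if c = '*' then []
  else if c = '(' then [] else if c = ')' then [] else [c]

def sanWordB (word : String) : String :=
  let cs := word.toList
  let cs :=
    if PySem.List.pyGet? cs (-1) = some '1' then
      PySem.List.slice cs none (some (-1)) ++ "one".toList
    else cs
  String.ofList (cs.flatMap transChar)

def sanitize_words_alt (text_list : List String) : String :=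
  PySem.Str.join " " (text_list.map sanWordB)

-- ===== PRECONDITION & SPEC =====
-- Pre_ excludes lists containing the empty word, on which both Pythons raise IndexError (word[-1])
def Pre_sanitize_words (text_list : List String) : Prop := "" ∉ text_list
instance (text_list : List String) : Decidable (Pre_sanitize_words text_list) := by
  unfold Pre_sanitize_words; infer_instance

def pvWitness_sanitize_words : List String := ["h3!!0", "w0r!d1", "w0r!d1", "c4t*"]

def Spec_sanitize_words (text_list : List String) (out : String) : Prop := out = sanitize_words_alt text_list
instance (text_list : List String) (out : String) : Decidable (Spec_sanitize_words text_list out) := by unfold Spec_sanitize_words; infer_instance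

-- ===== CLAIM (what is proved, stated in full; the proofs are below) =====
def Claim_equal_sanitize_words : Prop := ∀ (text_list : List String), Dom_sanitize_words text_list → Pre_sanitize_words text_list → Spec_sanitize_words text_list (sanitize_words text_list)

-- ===== LEMMAS AND PROOFS =====

-- replace with a single-char pattern is a per-character substitution
theorem replace_go_single (c : Char) (r : List Char) :
    ∀ (fuel : Nat) (l acc : List Char), l.length ≤ fuel →
      PySem.Chars.replace.go [c] r fuel l acc =
        acc.reverse ++ l.flatMap (fun x => if x = c then r else [x]) := by
  intro fuel
  induction fuel with
  | zero => intro l acc h; cases l with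
    | nil => simp [PySem.Chars.replace.go]
    | cons a t => simp at h
  | succ n ih =>
    intro l acc h
    cases l with
    | nil => simp [PySem.Chars.replace.go]
    | cons a t =>
      simp only [PySem.Chars.replace.go]
      by_cases hc : a = c
      · subst hc
        have hp : List.isPrefixOf [a] (a :: t) = true := by simp [List.isPrefixOf]
        rw [if_pos hp]
        simp only [List.length_cons] at h
        rw [ih _ _ (by simpa using Nat.le_of_succ_le_succ h)]
        simp
      · have hp : List.isPrefixOf [c] (a :: t) = false := by
          simp [List.isPrefixOf]; exact fun h' => absurd h'.symm hc
        rw [if_neg (by simp [hp])]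
        simp only [List.length_cons] at h
        rw [ih _ _ (Nat.le_of_succ_le_succ h)]
        simp [hc]

theorem replace_single (c : Char) (r s : List Char) :
    PySem.Chars.replace s [c] r = s.flatMap (fun x => if x = c then r else [x]) := by
  rw [PySem.Chars.replace]
  simp only [List.isEmpty_cons]
  exact replace_go_single c r s.length s [] (le_refl _)

-- the 14 sequential single-char replaces equal the simultaneous translation table:
-- no replacement output contains a key of any later replacement, so nothing cascades
theorem chain_eq (cs : List Char) :
    pySLANG_DICT.foldl (fun t p => PySem.Chars.replace t p.1 p.2) cs = cs.flatMap transChar := by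
  simp only [pySLANG_DICT, List.foldl_cons, List.foldl_nil, replace_single, List.flatMap_assoc]
  refine congrFun (congrArg List.flatMap (funext fun c => ?_)) cs
  by_cases h1 : c = '4'; · subst h1; decide
  by_cases h2 : c = '8'; · subst h2; decide
  by_cases h3 : c = '3'; · subst h3; decide
  by_cases h4 : c = '6'; · subst h4; decide
  by_cases h5 : c = '1'; · subst h5; decide
  by_cases h6 : c = '0'; · subst h6; decide
  by_cases h7 : c = '7'; · subst h7; decide
  by_cases h8 : c = '2'; · subst h8; decide
  by_cases h9 : c = '!'; · subst h9; decide
  by_cases h10 : c = '$'; · subst h10; decide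
  by_cases h11 : c = '@'; · subst h11; decide
  by_cases h12 : c = '*'; · subst h12; decide
  by_cases h13 : c = '('; · subst h13; decide
  by_cases h14 : c = ')'; · subst h14; decide
  simp [transChar, h1, h2, h3, h4, h5, h6, h7, h8, h9, h10, h11, h12, h13, h14]

theorem sanWordA_eq_sanWordB (w : String) : sanWordA w = sanWordB w := by
  unfold sanWordA sanWordB
  dsimp only
  rw [chain_eq]

theorem flatMap_id_of (l : List Char) (f : Char → List Char) (h : ∀ x ∈ l, f x = [x]) :
    l.flatMap f = l := by
  induction l with
  | nil => rfl
  | cons a t ih =>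
    simp only [List.flatMap_cons, h a (List.mem_cons_self),
      ih fun x hx => h x (List.mem_cons_of_mem a hx)]
    rfl

-- translation outputs contain no slang key, so translating is the identity on them
theorem trans_no_key (c c' : Char) (h : c' ∈ transChar c) : transChar c' = [c'] := by
  by_cases h1 : c = '4'; · subst h1; simp [transChar] at h; subst h; decide
  by_cases h2 : c = '8'; · subst h2; simp [transChar] at h; subst h; decide
  by_cases h3 : c = '3'; · subst h3; simp [transChar] at h; subst h; decide
  by_cases h4 : c = '6'; · subst h4; simp [transChar] at h; subst h; decide
  by_cases h5 : c = '1'; · subst h5; simp [transChar] at h; subst h; decide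
  by_cases h6 : c = '0'; · subst h6; simp [transChar] at h; subst h; decide
  by_cases h7 : c = '7'; · subst h7; simp [transChar] at h; subst h; decide
  by_cases h8 : c = '2'; · subst h8; simp [transChar] at h; subst h; decide
  by_cases h9 : c = '!'; · subst h9; simp [transChar] at h; subst h; decide
  by_cases h10 : c = '$'; · subst h10; simp [transChar] at h; subst h; decide
  by_cases h11 : c = '@'; · subst h11; simp [transChar] at h; subst h; decide
  by_cases h12 : c = '*'; · subst h12; simp [transChar] at h
  by_cases h13 : c = '('; · subst h13; simp [transChar] at h
  by_cases h14 : c = ')'; · subst h14; simp [transChar] at h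
  have hc : transChar c = [c] := by
    simp [transChar, h1, h2, h3, h4, h5, h6, h7, h8, h9, h10, h11, h12, h13, h14]
  rw [hc] at h
  simp at h; subst h; rw [hc]

-- a sanitized word is a fixed point of sanitization
theorem sanWordB_fixed (w v : String) (h : sanWordB w = v) : sanWordB v = v := by
  subst h
  unfold sanWordB
  dsimp only
  generalize (if PySem.List.pyGet? w.toList (-1) = some '1' then
      PySem.List.slice w.toList none (some (-1)) ++ "one".toList else w.toList) = cs
  have hfix : ∀ x ∈ cs.flatMap transChar, transChar x = [x] := by
    intro x hx
    rw [List.mem_flatMap] at hx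
    obtain ⟨c, _, hc⟩ := hx
    exact trans_no_key c x hc
  have hone : '1' ∉ cs.flatMap transChar := by
    intro hmem
    have := hfix '1' hmem
    simp [transChar] at this
  have htl : (String.ofList (cs.flatMap transChar)).toList = cs.flatMap transChar := by simp
  rw [htl]
  rw [if_neg (by
    rw [PySem.List.pyGet?_neg_one]
    intro hg
    exact hone (List.mem_of_getLast? hg))]
  rw [flatMap_id_of _ transChar hfix]

-- loop invariant: the processed prefix is the word-wise sanitization of the original prefix;
-- list.index always finds either the current slot or an earlier slot whose (sanitized) value
-- the current raw word already equals, in which case the write changes nothing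

theorem sanLoopA_eq_map (raw : List String) :
    ∀ n i l, raw.length - i = n →
      l = (raw.take i).map sanWordB ++ raw.drop i →
      sanLoopA l i = raw.map sanWordB := by
  intro n
  induction n with
  | zero =>
    intro i l hn hl
    have hge : raw.length ≤ i := by omega
    rw [sanLoopA]
    have hlen : l.length = raw.length := by simp [hl]; omega
    rw [dif_neg (by omega)]
    rw [hl, List.take_of_length_le hge, List.drop_of_length_le hge, List.append_nil]
  | succ n ih =>
    intro i l hn hl
    subst hl
    set L := (raw.take i).map sanWordB ++ raw.drop i with hL
    have hi : i < raw.length := by omega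
    have hpre : ((raw.take i).map sanWordB).length = i := by simp; omega
    have hlen : L.length = raw.length := by rw [hL]; simp; omega
    have hiL : i < L.length := by omega
    have hw : L[i] = raw[i] := by
      rw [List.getElem_of_eq hL, List.getElem_append_right (by omega)]
      have h0 : i - min i raw.length = 0 := by omega
      simp [h0]
    rw [sanLoopA, dif_pos hiL]
    have hmem : L[i] ∈ L := List.getElem_mem _
    have hsome : (PySem.List.index? L L[i]).isSome := by
      rw [PySem.List.index?_isSome_iff]; exact hmem
    obtain ⟨j, hj⟩ := Option.isSome_iff_exists.mp hsome
    obtain ⟨hjlt, hjv, hjmin⟩ := PySem.List.getElem_of_index?_eq_some hj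
    have hji : j ≤ i := by
      by_contra hc
      exact hjmin i (by omega) rfl
    simp only [hj, Option.getD_some]
    by_cases hcase : j = i
    · subst hcase
      apply ih (j + 1) _ (by omega)
      rw [List.set_append_right _ _ (by omega), hpre]
      simp only [Nat.sub_self]
      rw [List.drop_eq_getElem_cons (by omega), List.set_cons_zero]
      rw [List.take_add_one, List.map_append]
      simp [hi, List.append_assoc, sanWordA_eq_sanWordB, hw]
    · have hjlt' : j < i := by omega
      have hlj : L[j] = sanWordB (raw[j]'(by omega)) := by
        rw [List.getElem_of_eq hL, List.getElem_append_left (by rw [hpre]; omega)]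
        simp
      have hfix : sanWordB L[i] = L[i] := by
        rw [hw]
        have := sanWordB_fixed (raw[j]'(by omega)) raw[i] (by rw [← hlj, hjv, hw])
        exact this
      have hset : L.set j (sanWordA L[i]) = L := by
        rw [sanWordA_eq_sanWordB, hfix, ← hjv]
        exact List.set_getElem_self hjlt
      rw [hset]
      apply ih (i + 1) _ (by omega)
      rw [hL, List.drop_eq_getElem_cons hi]
      have h1 : raw[i] = sanWordB raw[i] := by rw [← hw, hfix]  -- note direction
      calc (raw.take i).map sanWordB ++ raw[i] :: raw.drop (i+1)
          = (raw.take i).map sanWordB ++ [sanWordB raw[i]] ++ raw.drop (i+1) := by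
            rw [← h1]; simp
        _ = (raw.take (i+1)).map sanWordB ++ raw.drop (i+1) := by
            rw [List.take_add_one, List.map_append]
            simp [hi, List.append_assoc]

-- ===== VERDICT (by name: the statement is the Claim_ definition above) =====
theorem sanitize_words_spec : Claim_equal_sanitize_words := by
  intro tl _ _
  unfold Spec_sanitize_words sanitize_words sanitize_words_alt
  rw [sanLoopA_eq_map tl tl.length 0 tl rfl (by simp)]
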